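-- pv_equiv track=rewrite | github.com/markvandendool/roxy | scientific_comparison.py | get_test_status
-- ===== SOURCE A (Python) =====
-- def get_test_status(data: dict, test_name: str) -> str:
--     """Get status of a specific test from results."""
--     for test in data.get('passed', []):
--         if test.get('test') == test_name:
--             return 'passed'
--     for test in data.get('failed', []):
--         if test.get('test') == test_name:
--             return 'failed'
--     for test in data.get('warnings', []):
--         if test.get('test') == test_name:
--             return 'warning'
--     return 'not_run'
-- ===== SOURCE B (Python) =====
-- def get_test_status(data: dict, test_name: str) -> str:
--     """Get status of a specific test from results."""
--     table = {}
--     for key, status in (('passed', 'passed'), ('failed', 'failed'), ('warnings', 'warning')):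
--         for t in data.get(key, []):
--             name = t.get('test')
--             if name not in table:
--                 table[name] = status
--     return table.get(test_name, 'not_run')
-- ===== Notes on version B (the rewrite author's own statement) =====
-- stated objective: alternative
-- what changed: Replaces three early-returning scans with a single index-building pass (a dict mapping test name to its first/highest-precedence status) followed by one O(1) lookup.
import Mathlib
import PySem

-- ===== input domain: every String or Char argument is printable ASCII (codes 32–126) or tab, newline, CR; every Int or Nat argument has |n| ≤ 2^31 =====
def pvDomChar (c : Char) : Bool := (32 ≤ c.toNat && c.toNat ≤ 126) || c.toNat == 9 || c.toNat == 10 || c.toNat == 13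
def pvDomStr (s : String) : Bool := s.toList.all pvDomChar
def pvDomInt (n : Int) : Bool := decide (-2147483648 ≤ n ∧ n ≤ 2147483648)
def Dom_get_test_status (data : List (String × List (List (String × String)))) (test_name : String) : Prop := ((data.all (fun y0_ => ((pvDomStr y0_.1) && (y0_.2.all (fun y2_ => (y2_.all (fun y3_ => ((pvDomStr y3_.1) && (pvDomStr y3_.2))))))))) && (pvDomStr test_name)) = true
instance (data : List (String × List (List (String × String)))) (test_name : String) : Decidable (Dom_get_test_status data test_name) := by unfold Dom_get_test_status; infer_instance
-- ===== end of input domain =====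

-- ===== PORT A =====
-- first-match lookup of key "test" in an entry dict (Python t.get('test'))
def pvGetName (t : List (String × String)) : Option String :=
  (PySem.Dict.mk t).get? "test"

-- A's 'for test in …: if test.get('test') == test_name: return <status>' loop
def pvFindA (tests : List (List (String × String))) (name : String) : Bool :=
  match tests with
  | [] => false
  | t :: r => if pvGetName t == some name then true else pvFindA r name

def get_test_status (data : List (String × List (List (String × String)))) (test_name : String) : String :=
  let d := PySem.Dict.mk data
  if pvFindA (d.getD "passed" []) test_name then "passed"
  else if pvFindA (d.getD "failed" []) test_name then "failed"
  else if pvFindA (d.getD "warnings" []) test_name then "warning"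
  else "not_run"

-- ===== PORT B =====
-- B's inner loop: insert each entry's name into the table unless already present
def pvAddMissing (tb : PySem.Dict (Option String) String) (status : String)
    (tests : List (List (String × String))) : PySem.Dict (Option String) String :=
  tests.foldl (fun tb t =>
    let n := pvGetName t
    if tb.contains n then tb else tb.insert n status) tb

def get_test_status_alt (data : List (String × List (List (String × String)))) (test_name : String) : String :=
  let d := PySem.Dict.mk data
  let table := [("passed", "passed"), ("failed", "failed"), ("warnings", "warning")].foldl
      (fun tb (p : String × String) => pvAddMissing tb p.2 (d.getD p.1 [])) PySem.Dict.empty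
  table.getD (some test_name) "not_run"

-- ===== PRECONDITION & SPEC =====
def Spec_get_test_status (data : List (String × List (List (String × String)))) (test_name : String) (out : String) : Prop := out = get_test_status_alt data test_name
instance (data : List (String × List (List (String × String)))) (test_name : String) (out : String) : Decidable (Spec_get_test_status data test_name out) := by unfold Spec_get_test_status; infer_instance

-- ===== CLAIM (what is proved, stated in full; the proofs are below) =====
def Claim_equal_get_test_status : Prop := ∀ (data : List (String × List (List (String × String)))) (test_name : String), Dom_get_test_status data test_name → Spec_get_test_status data test_name (get_test_status data test_name)

-- ===== LEMMAS AND PROOFS =====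

theorem pvFindA_eq_any (tests : List (List (String × String))) (name : String) :
    pvFindA tests name = tests.any (fun t => pvGetName t == some name) := by
  induction tests with
  | nil => rfl
  | cons t r ih =>
    by_cases h : pvGetName t == some name <;> simp [pvFindA, h, ih]

theorem get?_pvAddMissing (tests : List (List (String × String))) (s : String)
    (tb : PySem.Dict (Option String) String) (k : Option String) :
    (pvAddMissing tb s tests).get? k =
      ((tb.get? k).or (if tests.any (fun t => pvGetName t == k) then some s else none)) := by
  induction tests generalizing tb with
  | nil => simp [pvAddMissing]
  | cons t r ih =>
    simp only [pvAddMissing, List.foldl_cons, List.any_cons] at *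
    by_cases hc : tb.contains (pvGetName t) = true
    · rw [if_pos hc, ih]
      by_cases hk : pvGetName t == k
      · have hkk : pvGetName t = k := by exact eq_of_beq hk
        subst hkk
        have : (tb.get? (pvGetName t)).isSome := by
          rw [← PySem.Dict.contains_eq_isSome_get?]; exact hc
        obtain ⟨v, hv⟩ := Option.isSome_iff_exists.mp this
        simp [hv]
      · simp [hk]
    · rw [if_neg hc, ih]
      have hnone : tb.get? (pvGetName t) = none := by
        rcases h : tb.get? (pvGetName t) with _ | v
        · rfl
        · exfalso; apply hc
          rw [PySem.Dict.contains_eq_isSome_get?, h]; rfl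
      by_cases hk : pvGetName t == k
      · have hkk : pvGetName t = k := eq_of_beq hk
        subst hkk
        rw [PySem.Dict.get?_insert_self, hnone]
        simp
      · have hne : k ≠ pvGetName t := fun h => hk (by subst h; exact beq_self_eq_true _)
        rw [PySem.Dict.get?_insert_of_ne _ _ hne]
        simp [hk]

theorem getD_table (P F W : List (List (String × String))) (k : Option String) :
    (pvAddMissing (pvAddMissing (pvAddMissing PySem.Dict.empty "passed" P) "failed" F)
        "warning" W).getD k "not_run" =
      if P.any (fun t => pvGetName t == k) then "passed"
      else if F.any (fun t => pvGetName t == k) then "failed"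
      else if W.any (fun t => pvGetName t == k) then "warning"
      else "not_run" := by
  rw [PySem.Dict.getD_eq_get?_getD, get?_pvAddMissing, get?_pvAddMissing, get?_pvAddMissing]
  simp only [PySem.Dict.get?_empty, Option.none_or]
  split_ifs <;> rfl

-- ===== VERDICT (by name: the statement is the Claim_ definition above) =====
theorem get_test_status_spec : Claim_equal_get_test_status := by
  intro data test_name _
  simp only [Spec_get_test_status, get_test_status, get_test_status_alt, List.foldl_cons,
    List.foldl_nil, getD_table, pvFindA_eq_any]
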